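-- pv_equiv track=rewrite | github.com/jgonzalor/ICC | app_viewer_kmz.py | auto_pick_secciones
-- ===== SOURCE A (Python) =====
-- from typing import List, Tuple, Optional, Iterable, Dict
--
-- def auto_pick_secciones(shps: List[str]) -> Optional[str]:
--     low = [s.lower() for s in shps]
--     for i, s in enumerate(low):
--         if "secciones" in s and s.endswith(".shp"):
--             return shps[i]
--     for i, s in enumerate(low):
--         if "seccion" in s and s.endswith(".shp"):
--             return shps[i]
--     return None
-- ===== SOURCE B (Python) =====
-- def auto_pick_secciones(shps):
--     fallback = None
--     for orig in shps:
--         s = orig.lower()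
--         if s.endswith(".shp"):
--             if "secciones" in s:
--                 return orig
--             if "seccion" in s and fallback is None:
--                 fallback = orig
--     return fallback
-- ===== Notes on version B (the rewrite author's own statement) =====
-- stated objective: alternative
-- what changed: A's two priority passes (first scan for 'secciones', then a second full scan for 'seccion') are collapsed into one single pass that returns a 'secciones' hit immediately and records the first 'seccion' hit as a fallback returned after the loop.
import Mathlib
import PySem

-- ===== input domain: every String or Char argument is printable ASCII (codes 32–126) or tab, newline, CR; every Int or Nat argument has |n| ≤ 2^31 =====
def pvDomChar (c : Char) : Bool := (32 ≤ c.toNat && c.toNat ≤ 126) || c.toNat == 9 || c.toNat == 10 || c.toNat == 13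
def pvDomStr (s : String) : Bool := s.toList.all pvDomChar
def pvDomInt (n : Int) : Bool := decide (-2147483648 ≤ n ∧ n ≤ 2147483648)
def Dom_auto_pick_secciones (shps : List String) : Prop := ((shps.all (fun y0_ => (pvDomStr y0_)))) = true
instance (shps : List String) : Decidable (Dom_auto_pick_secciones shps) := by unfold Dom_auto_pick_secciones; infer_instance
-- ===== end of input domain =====

-- B merges A's two priority passes into a single pass with a saved fallback candidate (objective: alternative decomposition, same cost).

-- ===== PORT A =====
-- first pass of A: scan pairs (lowered name, original name), return the original on a match of `pat` + ".shp"
def pvScanA (pat : String) : List (String × String) → Option String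
  | [] => none
  | (s, orig) :: rest =>
      if PySem.Str.isIn pat s && PySem.Str.endswith s ".shp" then some orig
      else pvScanA pat rest

def auto_pick_secciones (shps : List String) : Option String :=
  let low := shps.map PySem.Str.lower
  match pvScanA "secciones" (low.zip shps) with
  | some v => some v
  | none =>
      match pvScanA "seccion" (low.zip shps) with
      | some v => some v
      | none => none

-- ===== PORT B =====
def pvLoopB : List String → Option String → Option String
  | [], fb => fb
  | orig :: rest, fb =>
      let s := PySem.Str.lower orig
      if PySem.Str.endswith s ".shp" then
        if PySem.Str.isIn "secciones" s then some orig
        else if PySem.Str.isIn "seccion" s && fb.isNone then pvLoopB rest (some orig)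
        else pvLoopB rest fb
      else pvLoopB rest fb

def auto_pick_secciones_alt (shps : List String) : Option String :=
  pvLoopB shps none

-- ===== PRECONDITION & SPEC =====
def Spec_auto_pick_secciones (shps : List String) (out : Option String) : Prop := out = auto_pick_secciones_alt shps
instance (shps : List String) (out : Option String) : Decidable (Spec_auto_pick_secciones shps out) := by unfold Spec_auto_pick_secciones; infer_instance

-- ===== CLAIM (what is proved, stated in full; the proofs are below) =====
def Claim_equal_auto_pick_secciones : Prop := ∀ (shps : List String), Dom_auto_pick_secciones shps → Spec_auto_pick_secciones shps (auto_pick_secciones shps)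

-- ===== LEMMAS AND PROOFS =====

-- B's loop equals: A's first pass, else the fallback, else A's second pass.
theorem pvLoopB_eq (shps : List String) : ∀ fb : Option String,
    pvLoopB shps fb =
      match pvScanA "secciones" ((shps.map PySem.Str.lower).zip shps) with
      | some v => some v
      | none =>
          match fb with
          | some v => some v
          | none => pvScanA "seccion" ((shps.map PySem.Str.lower).zip shps) := by
  induction shps with
  | nil => intro fb; cases fb <;> rfl
  | cons x xs ih =>
      intro fb
      by_cases h2 : PySem.Chars.endswith (PySem.Chars.lower x.toList) ['.','s','h','p'] = true <;>
        by_cases h1 : PySem.Chars.isIn ['s','e','c','c','i','o','n','e','s'] (PySem.Chars.lower x.toList) = true <;>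
          by_cases h3 : PySem.Chars.isIn ['s','e','c','c','i','o','n'] (PySem.Chars.lower x.toList) = true <;>
            cases fb <;>
              simp [pvLoopB, pvScanA, h1, h2, h3, ih]

-- ===== VERDICT (by name: the statement is the Claim_ definition above) =====
theorem auto_pick_secciones_spec : Claim_equal_auto_pick_secciones := by
  intro shps _
  show auto_pick_secciones shps = auto_pick_secciones_alt shps
  have hA : auto_pick_secciones shps =
      (match pvScanA "secciones" ((shps.map PySem.Str.lower).zip shps) with
       | some v => some v
       | none =>
           match pvScanA "seccion" ((shps.map PySem.Str.lower).zip shps) with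
           | some v => some v
           | none => none) := rfl
  rw [hA]
  unfold auto_pick_secciones_alt
  rw [pvLoopB_eq shps none]
  cases pvScanA "secciones" ((shps.map PySem.Str.lower).zip shps) with
  | some v => rfl
  | none => cases pvScanA "seccion" ((shps.map PySem.Str.lower).zip shps) <;> rfl
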